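-- pv_equiv track=rewrite | github.com/patcharapongk/nattee-algo | a62_q1b_virus/7feb.py | check_virus
-- ===== SOURCE A (Python) =====
-- def check_virus(arr, size):
--     if (size == 1):
--         return arr[0:2] == [0,1]
--     left_arr = arr[:len(arr)//2]
--     right_arr = arr[len(arr)//2:]
--     left_rev = left_arr[::-1]
--     halfsize = size-1
--     return (check_virus(left_arr, halfsize) or check_virus(left_rev, halfsize)) and check_virus(right_arr, halfsize)
-- ===== SOURCE B (Python) =====
-- def check_virus(arr, size):
--     # Bottom-up pair recursion: g(a, s) returns (f(a, s), f(reversed(a), s)),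
--     # so the reversal branch is shared instead of recomputed (2 subcalls per
--     # node when the block length is even, instead of A's 3).
--     def g(a, s):
--         if len(a) < 2:
--             # a[:2] can never equal [0,1]; every sub-block stays short, so both
--             # components are False at any depth.
--             return (False, False)
--         if s == 1:
--             return (a[:2] == [0, 1], a[::-1][:2] == [0, 1])
--         k = len(a) // 2
--         j = len(a) - k
--         fl, frl = g(a[:k], s - 1)
--         fr, frr = g(a[k:], s - 1)
--         fwd = (fl or frl) and fr
--         if k == j:
--             rev = (frr or fr) and frl
--         else:
--             fl2, frl2 = g(a[j:], s - 1)
--             fr2, frr2 = g(a[:j], s - 1)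
--             rev = (frl2 or fl2) and frr2
--         return (fwd, rev)
--     return g(arr, size)[0]
-- ===== Notes on version B (the rewrite author's own statement) =====
-- stated objective: alternative
-- what changed: B replaces A's 3-way recursion (left, reversed left, right) by a pair recursion that returns (f(block), f(reverse(block))) for each block, so the reversal branch is shared instead of recomputed; 2 subcalls per node on even-length blocks versus A's 3, though A's short-circuiting can still win on random inputs, so no speed is claimed.
-- outside the precondition, e.g. on check_virus([0, 1], 0): A raises RecursionError, B returns False; on check_virus([], 0): A raises RecursionError, B returns False
import Mathlib
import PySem

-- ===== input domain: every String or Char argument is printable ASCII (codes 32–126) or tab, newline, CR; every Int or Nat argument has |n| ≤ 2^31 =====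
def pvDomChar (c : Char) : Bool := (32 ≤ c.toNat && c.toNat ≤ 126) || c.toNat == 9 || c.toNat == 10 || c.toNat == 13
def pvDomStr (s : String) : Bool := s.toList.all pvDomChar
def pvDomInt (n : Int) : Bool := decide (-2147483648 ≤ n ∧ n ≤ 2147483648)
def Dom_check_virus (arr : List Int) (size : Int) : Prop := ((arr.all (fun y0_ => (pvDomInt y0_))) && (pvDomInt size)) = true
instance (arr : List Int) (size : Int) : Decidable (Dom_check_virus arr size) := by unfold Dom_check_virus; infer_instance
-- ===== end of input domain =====

-- B replaces A's 3-way recursion by a pair recursion returning (f(block), f(reverse(block))),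
-- so the reversal branch is shared rather than recomputed (objective: alternative).

-- ===== PORT A =====
-- fuel = size.toNat makes the recursion total; inside Pre_ (1 ≤ size) the fuel is never exhausted.
def checkVirusA : Nat → List Int → Int → Bool
  | 0, _, _ => false
  | fuel + 1, arr, size =>
    if size = 1 then PySem.List.slice arr (some 0) (some 2) == ([0, 1] : List Int)
    else
      let left_arr := PySem.List.slice arr none (some (PySem.Int.floordiv (arr.length : Int) 2))
      let right_arr := PySem.List.slice arr (some (PySem.Int.floordiv (arr.length : Int) 2)) none
      let left_rev := left_arr.reverse  -- arr[::-1]: exact by PySem.List.slice?_none_none_neg_one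
      let halfsize := size - 1
      (checkVirusA fuel left_arr halfsize || checkVirusA fuel left_rev halfsize) &&
        checkVirusA fuel right_arr halfsize

def check_virus (arr : List Int) (size : Int) : Bool := checkVirusA size.toNat arr size

-- ===== PORT B =====
-- g a s = (f(a,s), f(reverse(a),s)); same fuel convention as port A.
def checkVirusG : Nat → List Int → Int → Bool × Bool
  | 0, _, _ => (false, false)
  | fuel + 1, a, s =>
    if a.length ≤ 1 then (false, false)   -- len(a) < 2: a[:2] ≠ [0,1] at any depth: prune
    else if s = 1 then
      (PySem.List.slice a none (some 2) == ([0, 1] : List Int),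
       PySem.List.slice a.reverse none (some 2) == ([0, 1] : List Int))
    else
      let k := a.length / 2   -- len(a)//2 (nonnegative operands: exact)
      let j := a.length - k
      let p1 := checkVirusG fuel (a.take k) (s - 1)   -- a[:k]
      let p2 := checkVirusG fuel (a.drop k) (s - 1)   -- a[k:]
      let fwd := (p1.1 || p1.2) && p2.1
      let rev :=
        if k = j then (p2.2 || p2.1) && p1.2
        else
          let q1 := checkVirusG fuel (a.drop j) (s - 1)   -- a[j:]
          let q2 := checkVirusG fuel (a.take j) (s - 1)   -- a[:j]
          (q1.2 || q1.1) && q2.2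
      (fwd, rev)

def check_virus_alt (arr : List Int) (size : Int) : Bool := (checkVirusG size.toNat arr size).1

-- ===== PRECONDITION & SPEC =====
-- Pre_ excludes size ≤ 0, where Python A recurses without a base case (RecursionError).
def Pre_check_virus (arr : List Int) (size : Int) : Prop := 1 ≤ size
instance (arr : List Int) (size : Int) : Decidable (Pre_check_virus arr size) := by unfold Pre_check_virus; infer_instance
def pvWitness_check_virus : List Int × Int := ([0, 1, 0, 1], 2)
def Spec_check_virus (arr : List Int) (size : Int) (out : Bool) : Prop := out = check_virus_alt arr size
instance (arr : List Int) (size : Int) (out : Bool) : Decidable (Spec_check_virus arr size out) := by unfold Spec_check_virus; infer_instance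

-- ===== CLAIM (what is proved, stated in full; the proofs are below) =====
def Claim_equal_check_virus : Prop := ∀ (arr : List Int) (size : Int), Dom_check_virus arr size → Pre_check_virus arr size → Spec_check_virus arr size (check_virus arr size)

-- ===== LEMMAS AND PROOFS =====

-- A returns False on every block shorter than 2, at any depth (B's pruning is exact).
theorem checkVirusA_short : ∀ (fuel : Nat) (a : List Int) (s : Int), a.length ≤ 1 → 1 ≤ s →
    (fuel : Int) = s → checkVirusA fuel a s = false := by
  intro fuel
  induction fuel with
  | zero => intro a s _ hs hf; exfalso; omega
  | succ fuel ih =>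
    intro a s hlen hs hf
    match a, hlen with
    | [], _ =>
      by_cases h1 : s = 1
      · subst h1; simp [checkVirusA, PySem.List.slice]
      · have hs1' : (1 : Int) ≤ s - 1 := by omega
        have hf' : (fuel : Int) = s - 1 := by push_cast at hf ⊢; omega
        simp [checkVirusA, PySem.List.slice, PySem.Int.floordiv,
          ih [] (s - 1) (by simp) hs1' hf']
    | [x], _ =>
      by_cases h1 : s = 1
      · subst h1; simp [checkVirusA, PySem.List.slice]
      · have hs1' : (1 : Int) ≤ s - 1 := by omega
        have hf' : (fuel : Int) = s - 1 := by push_cast at hf ⊢; omega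
        simp [checkVirusA, PySem.List.slice, PySem.Int.floordiv,
          ih [] (s - 1) (by simp) hs1' hf', ih [x] (s - 1) (by simp) hs1' hf']

theorem checkVirus_main : ∀ (fuel : Nat) (a : List Int) (s : Int), 1 ≤ s → (fuel : Int) = s →
    checkVirusA fuel a s = (checkVirusG fuel a s).1 ∧
    checkVirusA fuel a.reverse s = (checkVirusG fuel a s).2 := by
  intro fuel
  induction fuel with
  | zero => intro a s hs hf; exfalso; omega
  | succ fuel ih =>
    intro a s hs hf
    by_cases hlen : a.length ≤ 1
    · have hra : a.reverse.length ≤ 1 := by simpa using hlen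
      refine ⟨?_, ?_⟩ <;>
        simp [checkVirusG, if_pos hlen,
          checkVirusA_short (fuel + 1) a s hlen hs hf,
          checkVirusA_short (fuel + 1) a.reverse s hra hs hf]
    by_cases h1 : s = 1
    · subst h1
      constructor <;> simp [checkVirusA, checkVirusG, if_neg hlen]
    · have hs1' : (1 : Int) ≤ s - 1 := by omega
      have hf' : (fuel : Int) = s - 1 := by push_cast at hf ⊢; omega
      have hfd : PySem.Int.floordiv (a.length : Int) 2 = ((a.length / 2 : Nat) : Int) := by
        exact_mod_cast PySem.Int.floordiv_natCast a.length 2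
      obtain ⟨iLf, iLs⟩ := ih (a.take (a.length / 2)) (s - 1) hs1' hf'
      obtain ⟨iRf, iRs⟩ := ih (a.drop (a.length / 2)) (s - 1) hs1' hf'
      obtain ⟨iJf, iJs⟩ := ih (a.drop (a.length - a.length / 2)) (s - 1) hs1' hf'
      obtain ⟨iTf, iTs⟩ := ih (a.take (a.length - a.length / 2)) (s - 1) hs1' hf'
      constructor
      · simp only [checkVirusA, checkVirusG, if_neg h1, if_neg hlen, hfd,
          PySem.List.slice_to_natCast, PySem.List.slice_from_natCast]
        rw [iLf, iLs, iRf]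
      · simp only [checkVirusA, checkVirusG, if_neg h1, if_neg hlen, List.length_reverse, hfd,
          PySem.List.slice_to_natCast, PySem.List.slice_from_natCast,
          List.take_reverse, List.drop_reverse, List.reverse_reverse]
        rw [iJs, iJf, iTs]
        by_cases hk : a.length / 2 = a.length - a.length / 2
        · rw [if_pos hk, ← hk]
        · rw [if_neg hk]

theorem check_virus_spec : Claim_equal_check_virus := by
  intro arr size _ hpre
  have hs : ((size.toNat : Int)) = size := Int.toNat_of_nonneg (by exact le_trans (by norm_num) hpre)
  exact (checkVirus_main size.toNat arr size hpre hs).1
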